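-- pv_equiv track=rewrite | github.com/Ambeeru-Vignesh/Dynamic-Programming-Project | RobotStack1.py | distribute_robots
-- ===== SOURCE A (Python) =====
-- def distribute_robots(b, n, k):
--     # Create a 3D array dp[b+1][n+1][k+1]
--     dp = [[[0 for _ in range(k + 1)] for _ in range(n + 1)] for _ in range(b + 1)]
--
--     # Initialize base cases
--     for i in range(b + 1):
--         for j in range(n + 1):
--             for x in range(k + 1):
--                 if i == 0:
--                     dp[i][j][x] = 1
--                 elif j <= 0 or x <= 0:
--                     dp[i][j][x] = 0
--                 else:
--                     dp[i][j][x] = 0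
--                     # Calculate dp[i][j][x] using the recurrence relation
--                     for y in range(min(x, i) + 1):
--                         dp[i][j][x] += dp[i - y][j - 1][x]
--
--     return dp[b][n][k]
-- ===== SOURCE B (Python) =====
-- def distribute_robots(b, n, k):
--     # Only the x = k layer of A's 3D table matters for dp[b][n][k]; on that layer the
--     # inner sum over y is a sliding window, so each cell is O(1):
--     #   dp[i][j] = dp[i-1][j] + dp[i][j-1] - (dp[i-k-1][j-1] if i >= k+1 else 0)
--     cur = [1] + [0] * b                 # column j = 0
--     for _ in range(n):
--         new = [1]
--         for i in range(1, b + 1):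
--             new.append(new[i - 1] + cur[i] - (cur[i - k - 1] if i >= k + 1 else 0))
--         cur = new
--     return cur[b]
-- ===== Notes on version B (the rewrite author's own statement) =====
-- stated objective: faster
-- what changed: Instead of filling a 3D table with an O(min(b,k)) inner summation per cell, B keeps only the x=k layer (the answer depends on no other layer) as a single 1D column and advances it with a sliding-window recurrence that makes each cell O(1).
import Mathlib
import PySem

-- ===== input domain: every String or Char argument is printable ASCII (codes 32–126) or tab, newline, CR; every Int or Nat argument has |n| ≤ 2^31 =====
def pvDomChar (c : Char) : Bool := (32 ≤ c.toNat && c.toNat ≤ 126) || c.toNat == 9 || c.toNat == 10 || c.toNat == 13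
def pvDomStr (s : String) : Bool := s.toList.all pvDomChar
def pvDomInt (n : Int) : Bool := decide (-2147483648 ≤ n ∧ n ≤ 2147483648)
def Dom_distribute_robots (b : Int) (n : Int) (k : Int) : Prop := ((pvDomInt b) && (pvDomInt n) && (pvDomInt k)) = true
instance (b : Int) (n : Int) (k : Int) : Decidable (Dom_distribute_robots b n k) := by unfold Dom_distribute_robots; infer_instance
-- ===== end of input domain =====

-- B replaces A's 3D table (with an O(min(b,k)) summation per cell) by a single 1D column of
-- the x = k layer advanced with a sliding-window recurrence; equivalence is proved on b,n,k ≥ 0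
-- (A raises IndexError on any negative argument).

-- ===== PORT A =====
-- dp[i][j][x] read / write on the nested list; exact for the nonnegative in-range
-- indices A uses on Pre_ (every index A touches is inside the (b+1)x(n+1)x(k+1) table).
def dpGet (dp : List (List (List Int))) (i j x : Int) : Int :=
  ((dp.getD i.toNat []).getD j.toNat []).getD x.toNat 0

def dpSet (dp : List (List (List Int))) (i j x v : Int) : List (List (List Int)) :=
  dp.modify i.toNat (fun r => r.modify j.toNat (fun c => c.set x.toNat v))

-- body of the x-loop: the if/elif/else filling dp[i][j][x] (same branch order as A)
def aCell (dp : List (List (List Int))) (i j x : Int) : List (List (List Int)) :=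
  if i = 0 then dpSet dp i j x 1
  else if j ≤ 0 ∨ x ≤ 0 then dpSet dp i j x 0
  else
    (PySem.List.pyRange 0 (min x i + 1) 1).foldl
      (fun dp y => dpSet dp i j x (dpGet dp i j x + dpGet dp (i - y) (j - 1) x))
      (dpSet dp i j x 0)

def distribute_robots (b : Int) (n : Int) (k : Int) : Int :=
  let dp0 :=
    (PySem.List.pyRange 0 (b + 1) 1).map (fun _ =>
      (PySem.List.pyRange 0 (n + 1) 1).map (fun _ =>
        (PySem.List.pyRange 0 (k + 1) 1).map (fun _ => (0 : Int))))
  let dp :=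
    (PySem.List.pyRange 0 (b + 1) 1).foldl (fun dp i =>
      (PySem.List.pyRange 0 (n + 1) 1).foldl (fun dp j =>
        (PySem.List.pyRange 0 (k + 1) 1).foldl (fun dp x => aCell dp i j x) dp) dp)
      dp0
  dpGet dp b n k

-- ===== PORT B =====
def distribute_robots_alt (b : Int) (n : Int) (k : Int) : Int :=
  let cur : List Int := 1 :: List.replicate b.toNat 0      -- [1] + [0]*b
  let cur :=
    (PySem.List.pyRange 0 n 1).foldl (fun cur _ =>
      (PySem.List.pyRange 1 (b + 1) 1).foldl (fun new i =>
        new ++ [PySem.List.pyGetD new (i - 1) 0 + PySem.List.pyGetD cur i 0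
                - (if k + 1 ≤ i then PySem.List.pyGetD cur (i - k - 1) 0 else 0)]) [1]) cur
  PySem.List.pyGetD cur b 0                                -- cur[b]

-- ===== PRECONDITION & SPEC =====
-- A raises IndexError whenever b < 0, n < 0 or k < 0 (an empty axis is then indexed).
def Pre_distribute_robots (b : Int) (n : Int) (k : Int) : Prop := 0 ≤ b ∧ 0 ≤ n ∧ 0 ≤ k
instance (b : Int) (n : Int) (k : Int) : Decidable (Pre_distribute_robots b n k) := by
  unfold Pre_distribute_robots; infer_instance

def pvWitness_distribute_robots : Int × Int × Int := (3, 2, 2)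

def Spec_distribute_robots (b : Int) (n : Int) (k : Int) (out : Int) : Prop := out = distribute_robots_alt b n k
instance (b : Int) (n : Int) (k : Int) (out : Int) : Decidable (Spec_distribute_robots b n k out) := by unfold Spec_distribute_robots; infer_instance

-- ===== CLAIM (what is proved, stated in full; the proofs are below) =====
def Claim_equal_distribute_robots : Prop := ∀ (b : Int) (n : Int) (k : Int), Dom_distribute_robots b n k → Pre_distribute_robots b n k → Spec_distribute_robots b n k (distribute_robots b n k)

-- ===== LEMMAS AND PROOFS =====

-- ghost (proof-side) model of A's table as a total map, with its updates
def pyUpd3 (dp : Int → Int → Int → Int) (i j x v : Int) : Int → Int → Int → Int :=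
  fun a b c => if a = i ∧ b = j ∧ c = x then v else dp a b c

def gCell (dp : Int → Int → Int → Int) (i j x : Int) : Int → Int → Int → Int :=
  if i = 0 then pyUpd3 dp i j x 1
  else if j ≤ 0 ∨ x ≤ 0 then pyUpd3 dp i j x 0
  else
    (PySem.List.pyRange 0 (min x i + 1) 1).foldl
      (fun dp y => pyUpd3 dp i j x (dp i j x + dp (i - y) (j - 1) x))
      (pyUpd3 dp i j x 0)

-- the mathematical value of A's cell dp[i][j][x] (recursion on j)
def fDP (k : Nat) : Nat → Nat → Int
  | 0, i => if i = 0 then 1 else 0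
  | j + 1, i => if i = 0 then 1 else if k = 0 then 0 else
      ∑ y ∈ Finset.range (min k i + 1), fDP k j (i - y)

theorem fDP_zero (k j : Nat) : fDP k j 0 = 1 := by cases j <;> simp [fDP]

theorem fDP_k0 (j i : Nat) (hi : i ≠ 0) : fDP 0 j i = 0 := by cases j <;> simp [fDP, hi]

-- the recurrence holds in this sum form for ALL k, i
theorem fDP_sum (k j i : Nat) :
    fDP k (j + 1) i = ∑ y ∈ Finset.range (min k i + 1), fDP k j (i - y) := by
  rcases Nat.eq_zero_or_pos i with hi | hi
  · subst hi; simp [fDP_zero]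
  rcases Nat.eq_zero_or_pos k with hk | hk
  · subst hk; simp [fDP, Nat.pos_iff_ne_zero.mp hi, fDP_k0 j i (Nat.pos_iff_ne_zero.mp hi)]
  · simp [fDP, Nat.pos_iff_ne_zero.mp hi, Nat.pos_iff_ne_zero.mp hk]

-- sliding-window form of the recurrence
theorem fDP_slide (k j M : Nat) :
    fDP k (j + 1) (M + 1) =
      fDP k (j + 1) M + fDP k j (M + 1) - (if k ≤ M then fDP k j (M - k) else 0) := by
  rw [fDP_sum, fDP_sum]
  have hre : ∀ y ∈ Finset.range (min k M + 1), fDP k j (M + 1 - (y + 1)) = fDP k j (M - y) :=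
    fun y _ => by rw [show M + 1 - (y + 1) = M - y from by omega]
  by_cases hk : k ≤ M
  · rw [if_pos hk, Nat.min_eq_left (by omega), Nat.min_eq_left hk]
    have h1 : ∑ y ∈ Finset.range (k + 1 + 1), fDP k j (M + 1 - y)
        = (∑ y ∈ Finset.range (k + 1), fDP k j (M + 1 - y)) + fDP k j (M - k) := by
      rw [Finset.sum_range_succ, show M + 1 - (k + 1) = M - k from by omega]
    have h2 : ∑ y ∈ Finset.range (k + 1 + 1), fDP k j (M + 1 - y)
        = (∑ y ∈ Finset.range (k + 1), fDP k j (M - y)) + fDP k j (M + 1) := by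
      rw [Finset.sum_range_succ',
          Finset.sum_congr rfl (by rw [Nat.min_eq_left hk] at hre; exact hre),
          show M + 1 - 0 = M + 1 from rfl]
    linarith
  · rw [if_neg hk, Nat.min_eq_right (by omega), Nat.min_eq_right (by omega),
        Finset.sum_range_succ',
        Finset.sum_congr rfl (by rw [Nat.min_eq_right (by omega)] at hre; exact hre),
        show M + 1 - 0 = M + 1 from rfl]
    ring

-- ---- pyUpd3 facts ----
theorem pyUpd3_same (dp : Int → Int → Int → Int) (i j x v : Int) :
    pyUpd3 dp i j x v i j x = v := by simp [pyUpd3]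

theorem pyUpd3_ne (dp : Int → Int → Int → Int) (i j x v a b c : Int)
    (h : ¬(a = i ∧ b = j ∧ c = x)) : pyUpd3 dp i j x v a b c = dp a b c := by
  simp [pyUpd3, h]

theorem pyUpd3_upd (dp : Int → Int → Int → Int) (i j x v w : Int) :
    pyUpd3 (pyUpd3 dp i j x v) i j x w = pyUpd3 dp i j x w := by
  funext a b c
  by_cases h : a = i ∧ b = j ∧ c = x
  · obtain ⟨rfl, rfl, rfl⟩ := h; rw [pyUpd3_same, pyUpd3_same]
  · rw [pyUpd3_ne _ _ _ _ _ _ _ _ h, pyUpd3_ne _ _ _ _ _ _ _ _ h,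
        pyUpd3_ne _ _ _ _ _ _ _ _ h]

-- ---- A side (ghost map level) ----

-- the inner y-loop accumulates the window sum into cell (i,j,x)
theorem innerSum (dp : Int → Int → Int → Int) (i j x : Int) (m : Nat) :
    (PySem.List.pyRange 0 (m : Int) 1).foldl
      (fun dp y => pyUpd3 dp i j x (dp i j x + dp (i - y) (j - 1) x))
      (pyUpd3 dp i j x 0)
    = pyUpd3 dp i j x (∑ y ∈ Finset.range m, dp (i - (y : Int)) (j - 1) x) := by
  induction m with
  | zero => simp [PySem.List.pyRange_one_eq_nil]
  | succ m ih =>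
    have hcast : ((m + 1 : Nat) : Int) = (m : Int) + 1 := by push_cast; ring
    have hsplit : PySem.List.pyRange 0 ((m : Int) + 1) 1
        = PySem.List.pyRange 0 (m : Int) 1 ++ [(m : Int)] :=
      PySem.List.pyRange_one_succ_right (by positivity)
    rw [hcast, hsplit, List.foldl_append, ih]
    simp only [List.foldl_cons, List.foldl_nil]
    rw [pyUpd3_same, pyUpd3_ne _ _ _ _ _ _ _ _ (fun h => by omega), pyUpd3_upd,
        Finset.sum_range_succ]

-- region already filled when cell (i,j,x) is about to be computed
def InvC (K N : Nat) (i j X : Int) (dp : Int → Int → Int → Int) : Prop :=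
  ∀ a b c : Int, 0 ≤ a → 0 ≤ b → b ≤ (N : Int) → 0 ≤ c → c ≤ (K : Int) →
    (a < i ∨ (a = i ∧ b < j) ∨ (a = i ∧ b = j ∧ c < X)) →
    dp a b c = fDP c.toNat b.toNat a.toNat

theorem gCell_correct (K N : Nat) (dp : Int → Int → Int → Int) (i j x : Int)
    (hi : 0 ≤ i) (hj : 0 ≤ j) (hjN : j ≤ (N : Int)) (hx : 0 ≤ x) (hxK : x ≤ (K : Int))
    (hinv : InvC K N i j x dp) :
    gCell dp i j x = pyUpd3 dp i j x (fDP x.toNat j.toNat i.toNat) := by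
  unfold gCell
  by_cases hi0 : i = 0
  · rw [if_pos hi0]; subst hi0; rw [show (0:Int).toNat = 0 from rfl, fDP_zero]
  rw [if_neg hi0]
  by_cases hjx0 : j ≤ 0 ∨ x ≤ 0
  · rw [if_pos hjx0]
    congr 1
    rcases hjx0 with h | h
    · have : j = 0 := le_antisymm h hj
      subst this
      have hj' : (0:Int).toNat = 0 := rfl
      rw [hj']
      show (0:Int) = fDP x.toNat 0 i.toNat
      simp [fDP]; omega
    · have : x = 0 := le_antisymm h hx
      subst this
      rw [show (0:Int).toNat = 0 from rfl, fDP_k0 _ _ (by omega)]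
  · rw [if_neg hjx0]
    rw [not_or] at hjx0
    rw [not_le, not_le] at hjx0
    obtain ⟨hj1, hx1⟩ := hjx0
    have hm : min x i + 1 = ((min x.toNat i.toNat + 1 : Nat) : Int) := by
      push_cast; omega
    rw [hm, innerSum]
    congr 1
    have hterm : ∀ y ∈ Finset.range (min x.toNat i.toNat + 1),
        dp (i - (y : Int)) (j - 1) x = fDP x.toNat (j - 1).toNat (i - (y : Int)).toNat := by
      intro y hy
      simp only [Finset.mem_range] at hy
      apply hinv <;> omega
    rw [Finset.sum_congr rfl hterm]
    have hJ : j.toNat = (j - 1).toNat + 1 := by omega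
    rw [hJ, fDP_sum]
    apply Finset.sum_congr rfl
    intro y hy
    simp only [Finset.mem_range] at hy
    congr 1
    omega

theorem InvC_step (K N : Nat) (dp : Int → Int → Int → Int) (i j x : Int)
    (hi : 0 ≤ i) (hj : 0 ≤ j) (hjN : j ≤ (N : Int)) (hx : 0 ≤ x) (hxK : x ≤ (K : Int))
    (hinv : InvC K N i j x dp) :
    InvC K N i j (x + 1) (gCell dp i j x) := by
  rw [gCell_correct K N dp i j x hi hj hjN hx hxK hinv]
  intro a b c ha hb hbN hc hcK hreg
  by_cases h : a = i ∧ b = j ∧ c = x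
  · obtain ⟨rfl, rfl, rfl⟩ := h
    exact pyUpd3_same ..
  · rw [pyUpd3_ne _ _ _ _ _ _ _ _ h]
    apply hinv a b c ha hb hbN hc hcK
    rcases hreg with h1 | h1 | h1
    · exact Or.inl h1
    · exact Or.inr (Or.inl h1)
    · right; right
      refine ⟨h1.1, h1.2.1, ?_⟩
      have := h1.2.2
      rcases lt_or_eq_of_le (Int.lt_add_one_iff.mp this) with h2 | h2
      · exact h2
      · exact absurd ⟨h1.1, h1.2.1, h2⟩ h

-- the column (x-)loop fills cells (i,j,0..M-1)
theorem colLoop (K N : Nat) (i j : Int)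
    (hi : 0 ≤ i) (hj : 0 ≤ j) (hjN : j ≤ (N : Int)) (M : Nat) (hM : (M : Int) ≤ (K : Int) + 1) :
    ∀ dp, InvC K N i j 0 dp →
      InvC K N i j (M : Int)
        ((PySem.List.pyRange 0 (M : Int) 1).foldl (fun dp x => gCell dp i j x) dp) := by
  induction M with
  | zero => intro dp h; simpa [PySem.List.pyRange_one_eq_nil] using h
  | succ M ih =>
    intro dp h
    have hcast : ((M + 1 : Nat) : Int) = (M : Int) + 1 := by push_cast; ring
    have hsplit : PySem.List.pyRange 0 ((M : Int) + 1) 1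
        = PySem.List.pyRange 0 (M : Int) 1 ++ [(M : Int)] :=
      PySem.List.pyRange_one_succ_right (by positivity)
    rw [hcast, hsplit, List.foldl_append]
    simp only [List.foldl_cons, List.foldl_nil]
    exact InvC_step K N _ i j (M : Int) hi hj hjN (by positivity) (by omega)
      (ih (by omega) dp h)

-- the row (j-)loop
theorem rowLoop (K N : Nat) (i : Int) (hi : 0 ≤ i) (M : Nat) (hM : (M : Int) ≤ (N : Int) + 1) :
    ∀ dp, InvC K N i 0 0 dp →
      InvC K N i (M : Int) 0
        ((PySem.List.pyRange 0 (M : Int) 1).foldl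
          (fun dp j => (PySem.List.pyRange 0 ((K : Int) + 1) 1).foldl
            (fun dp x => gCell dp i j x) dp) dp) := by
  induction M with
  | zero => intro dp h; simpa [PySem.List.pyRange_one_eq_nil] using h
  | succ M ih =>
    intro dp h
    have hcast : ((M + 1 : Nat) : Int) = (M : Int) + 1 := by push_cast; ring
    have hsplit : PySem.List.pyRange 0 ((M : Int) + 1) 1
        = PySem.List.pyRange 0 (M : Int) 1 ++ [(M : Int)] :=
      PySem.List.pyRange_one_succ_right (by positivity)
    rw [hcast, hsplit, List.foldl_append]
    simp only [List.foldl_cons, List.foldl_nil]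
    have hprev := ih (by omega) dp h
    have hKcast : ((K : Int) + 1) = ((K + 1 : Nat) : Int) := by push_cast; ring
    have hcol := colLoop K N i (M : Int) hi (by positivity) (by omega) (K + 1) (by push_cast; omega)
      _ (fun a b c ha hb hbN hc hcK hreg => hprev a b c ha hb hbN hc hcK (by omega))
    rw [hKcast]
    intro a b c ha hb hbN hc hcK hreg
    apply hcol a b c ha hb hbN hc hcK
    push_cast at hreg ⊢
    omega

-- the outer (i-)loop
theorem outerLoop (K N : Nat) (M : Nat) :
    InvC K N (M : Int) 0 0
      ((PySem.List.pyRange 0 (M : Int) 1).foldl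
        (fun dp i => (PySem.List.pyRange 0 ((N : Int) + 1) 1).foldl
          (fun dp j => (PySem.List.pyRange 0 ((K : Int) + 1) 1).foldl
            (fun dp x => gCell dp i j x) dp) dp)
        (fun _ _ _ => 0)) := by
  induction M with
  | zero =>
    simp only [Nat.cast_zero, PySem.List.pyRange_one_eq_nil le_rfl, List.foldl_nil]
    intro a b c ha hb hbN hc hcK hreg
    omega
  | succ M ih =>
    have hcast : ((M + 1 : Nat) : Int) = (M : Int) + 1 := by push_cast; ring
    have hsplit : PySem.List.pyRange 0 ((M : Int) + 1) 1
        = PySem.List.pyRange 0 (M : Int) 1 ++ [(M : Int)] :=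
      PySem.List.pyRange_one_succ_right (by positivity)
    rw [hcast, hsplit, List.foldl_append]
    simp only [List.foldl_cons, List.foldl_nil]
    have hNcast : ((N : Int) + 1) = ((N + 1 : Nat) : Int) := by push_cast; ring
    have hrow := rowLoop K N (M : Int) (by positivity) (N + 1) (by push_cast; omega) _
      (fun a b c ha hb hbN hc hcK hreg => ih a b c ha hb hbN hc hcK (by omega))
    rw [hNcast]
    intro a b c ha hb hbN hc hcK hreg
    apply hrow a b c ha hb hbN hc hcK
    push_cast at hreg ⊢
    omega

-- ---- lifting the list table to the ghost map ----

def mk3 (B N K : Nat) (g : Int → Int → Int → Int) : List (List (List Int)) :=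
  (List.range (B + 1)).map (fun (a : Nat) =>
    (List.range (N + 1)).map (fun (b : Nat) =>
      (List.range (K + 1)).map (fun (c : Nat) => g (a : Int) (b : Int) (c : Int))))

theorem modify_map_range {α : Type} (n : Nat) (f : Nat → α) (i : Nat) (t : α → α) :
    ((List.range n).map f).modify i t
      = (List.range n).map (fun a => if a = i then t (f a) else f a) := by
  apply List.ext_getElem?
  intro m
  rw [List.getElem?_modify]
  by_cases hm : m < n
  · rw [List.getElem?_map, List.getElem?_range hm, List.getElem?_map, List.getElem?_range hm]
    by_cases hmi : i = m
    · subst hmi; simp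
    · simp [hmi, Ne.symm hmi]
  · rw [List.getElem?_eq_none (by simpa using hm), List.getElem?_eq_none (by simpa using hm)]
    rfl

theorem set_map_range {α : Type} (n : Nat) (f : Nat → α) (i : Nat) (v : α) :
    ((List.range n).map f).set i v
      = (List.range n).map (fun a => if a = i then v else f a) := by
  rw [List.set_eq_modify, modify_map_range]

theorem mk3_get (B N K : Nat) (g : Int → Int → Int → Int) (i j x : Int)
    (hi : 0 ≤ i) (hiB : i ≤ (B : Int)) (hj : 0 ≤ j) (hjN : j ≤ (N : Int))
    (hx : 0 ≤ x) (hxK : x ≤ (K : Int)) :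
    dpGet (mk3 B N K g) i j x = g i j x := by
  unfold dpGet mk3
  simp only [List.getD_eq_getElem?_getD]
  rw [List.getElem?_map, List.getElem?_range (show i.toNat < B + 1 by omega)]
  simp only [Option.map_some, Option.getD_some]
  rw [List.getElem?_map, List.getElem?_range (show j.toNat < N + 1 by omega)]
  simp only [Option.map_some, Option.getD_some]
  rw [List.getElem?_map, List.getElem?_range (show x.toNat < K + 1 by omega)]
  simp only [Option.map_some, Option.getD_some]
  rw [Int.toNat_of_nonneg hi, Int.toNat_of_nonneg hj, Int.toNat_of_nonneg hx]

theorem mk3_set (B N K : Nat) (g : Int → Int → Int → Int) (i j x v : Int)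
    (hi : 0 ≤ i) (_hiB : i ≤ (B : Int)) (hj : 0 ≤ j) (_hjN : j ≤ (N : Int))
    (hx : 0 ≤ x) (_hxK : x ≤ (K : Int)) :
    dpSet (mk3 B N K g) i j x v = mk3 B N K (pyUpd3 g i j x v) := by
  unfold dpSet mk3
  rw [modify_map_range]
  apply List.map_congr_left
  intro a ha
  simp only [List.mem_range] at ha
  by_cases hai : a = i.toNat
  · subst hai
    rw [if_pos rfl, modify_map_range]
    apply List.map_congr_left
    intro b hb
    simp only [List.mem_range] at hb
    by_cases hbj : b = j.toNat
    · subst hbj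
      rw [if_pos rfl, set_map_range]
      apply List.map_congr_left
      intro c hc
      simp only [List.mem_range] at hc
      simp only [pyUpd3]
      by_cases hcx : c = x.toNat
      · subst hcx
        rw [if_pos rfl, if_pos ⟨by omega, by omega, by omega⟩]
      · rw [if_neg hcx, if_neg (by intro h; omega)]
    · rw [if_neg hbj]
      apply List.map_congr_left
      intro c _
      simp only [pyUpd3]
      rw [if_neg (by intro h; omega)]
  · rw [if_neg hai]
    apply List.map_congr_left
    intro b _
    apply List.map_congr_left
    intro c _
    simp only [pyUpd3]
    rw [if_neg (by intro h; omega)]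

theorem liftInner (B N K : Nat) (g : Int → Int → Int → Int) (i j x : Int)
    (hi : 0 ≤ i) (hiB : i ≤ (B : Int)) (hj : 1 ≤ j) (hjN : j ≤ (N : Int))
    (hx : 1 ≤ x) (hxK : x ≤ (K : Int)) (m : Nat) (hm : (m : Int) ≤ min x i + 1) :
    (PySem.List.pyRange 0 (m : Int) 1).foldl
      (fun dp y => dpSet dp i j x (dpGet dp i j x + dpGet dp (i - y) (j - 1) x))
      (dpSet (mk3 B N K g) i j x 0)
    = mk3 B N K
        ((PySem.List.pyRange 0 (m : Int) 1).foldl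
          (fun dp y => pyUpd3 dp i j x (dp i j x + dp (i - y) (j - 1) x))
          (pyUpd3 g i j x 0)) := by
  induction m with
  | zero =>
    simp only [Nat.cast_zero, PySem.List.pyRange_one_eq_nil le_rfl, List.foldl_nil]
    exact mk3_set B N K g i j x 0 hi hiB (by omega) hjN (by omega) hxK
  | succ m ih =>
    have hcast : ((m + 1 : Nat) : Int) = (m : Int) + 1 := by push_cast; ring
    have hsplit : PySem.List.pyRange 0 ((m : Int) + 1) 1
        = PySem.List.pyRange 0 (m : Int) 1 ++ [(m : Int)] :=
      PySem.List.pyRange_one_succ_right (by positivity)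
    rw [hcast, hsplit]
    simp only [List.foldl_append, List.foldl_cons, List.foldl_nil]
    rw [ih (by omega)]
    rw [mk3_get B N K _ i j x (by omega) hiB (by omega) hjN (by omega) hxK,
        mk3_get B N K _ (i - (m : Int)) (j - 1) x (by omega) (by omega) (by omega)
          (by omega) (by omega) hxK,
        mk3_set B N K _ i j x _ (by omega) hiB (by omega) hjN (by omega) hxK]

theorem liftCell (B N K : Nat) (g : Int → Int → Int → Int) (i j x : Int)
    (hi : 0 ≤ i) (hiB : i ≤ (B : Int)) (hj : 0 ≤ j) (hjN : j ≤ (N : Int))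
    (hx : 0 ≤ x) (hxK : x ≤ (K : Int)) :
    aCell (mk3 B N K g) i j x = mk3 B N K (gCell g i j x) := by
  unfold aCell gCell
  by_cases hi0 : i = 0
  · rw [if_pos hi0, if_pos hi0]
    exact mk3_set B N K g i j x 1 hi hiB hj hjN hx hxK
  rw [if_neg hi0, if_neg hi0]
  by_cases hjx : j ≤ 0 ∨ x ≤ 0
  · rw [if_pos hjx, if_pos hjx]
    exact mk3_set B N K g i j x 0 hi hiB hj hjN hx hxK
  · rw [if_neg hjx, if_neg hjx]
    rw [not_or] at hjx
    rw [not_le, not_le] at hjx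
    obtain ⟨hj1, hx1⟩ := hjx
    have hmm : min x i + 1 = (((min x i + 1).toNat : Nat) : Int) := by omega
    rw [hmm]
    exact liftInner B N K g i j x hi hiB (by omega) hjN (by omega) hxK _ (by omega)

theorem liftCol (B N K : Nat) (g : Int → Int → Int → Int) (i j : Int)
    (hi : 0 ≤ i) (hiB : i ≤ (B : Int)) (hj : 0 ≤ j) (hjN : j ≤ (N : Int))
    (M : Nat) (hM : (M : Int) ≤ (K : Int) + 1) :
    (PySem.List.pyRange 0 (M : Int) 1).foldl (fun dp x => aCell dp i j x) (mk3 B N K g)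
    = mk3 B N K
        ((PySem.List.pyRange 0 (M : Int) 1).foldl (fun dp x => gCell dp i j x) g) := by
  induction M with
  | zero => simp [PySem.List.pyRange_one_eq_nil]
  | succ M ih =>
    have hcast : ((M + 1 : Nat) : Int) = (M : Int) + 1 := by push_cast; ring
    have hsplit : PySem.List.pyRange 0 ((M : Int) + 1) 1
        = PySem.List.pyRange 0 (M : Int) 1 ++ [(M : Int)] :=
      PySem.List.pyRange_one_succ_right (by positivity)
    rw [hcast, hsplit]
    simp only [List.foldl_append, List.foldl_cons, List.foldl_nil]
    rw [ih (by omega)]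
    exact liftCell B N K _ i j (M : Int) hi hiB hj hjN (by positivity) (by omega)

theorem liftRow (B N K : Nat) (g : Int → Int → Int → Int) (i : Int)
    (hi : 0 ≤ i) (hiB : i ≤ (B : Int)) (M : Nat) (hM : (M : Int) ≤ (N : Int) + 1) :
    (PySem.List.pyRange 0 (M : Int) 1).foldl
      (fun dp j => (PySem.List.pyRange 0 ((K : Int) + 1) 1).foldl
        (fun dp x => aCell dp i j x) dp) (mk3 B N K g)
    = mk3 B N K
        ((PySem.List.pyRange 0 (M : Int) 1).foldl
          (fun dp j => (PySem.List.pyRange 0 ((K : Int) + 1) 1).foldl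
            (fun dp x => gCell dp i j x) dp) g) := by
  induction M with
  | zero => simp [PySem.List.pyRange_one_eq_nil]
  | succ M ih =>
    have hcast : ((M + 1 : Nat) : Int) = (M : Int) + 1 := by push_cast; ring
    have hsplit : PySem.List.pyRange 0 ((M : Int) + 1) 1
        = PySem.List.pyRange 0 (M : Int) 1 ++ [(M : Int)] :=
      PySem.List.pyRange_one_succ_right (by positivity)
    rw [hcast, hsplit]
    simp only [List.foldl_append, List.foldl_cons, List.foldl_nil]
    rw [ih (by omega)]
    have hKcast : ((K : Int) + 1) = ((K + 1 : Nat) : Int) := by push_cast; ring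
    rw [hKcast]
    exact liftCol B N K _ i (M : Int) hi hiB (by positivity) (by omega) (K + 1)
      (by push_cast; omega)

theorem liftOuter (B N K : Nat) (M : Nat) (hM : (M : Int) ≤ (B : Int) + 1) :
    (PySem.List.pyRange 0 (M : Int) 1).foldl
      (fun dp i => (PySem.List.pyRange 0 ((N : Int) + 1) 1).foldl
        (fun dp j => (PySem.List.pyRange 0 ((K : Int) + 1) 1).foldl
          (fun dp x => aCell dp i j x) dp) dp) (mk3 B N K (fun _ _ _ => 0))
    = mk3 B N K
        ((PySem.List.pyRange 0 (M : Int) 1).foldl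
          (fun dp i => (PySem.List.pyRange 0 ((N : Int) + 1) 1).foldl
            (fun dp j => (PySem.List.pyRange 0 ((K : Int) + 1) 1).foldl
              (fun dp x => gCell dp i j x) dp) dp) (fun _ _ _ => 0)) := by
  induction M with
  | zero => simp [PySem.List.pyRange_one_eq_nil]
  | succ M ih =>
    have hcast : ((M + 1 : Nat) : Int) = (M : Int) + 1 := by push_cast; ring
    have hsplit : PySem.List.pyRange 0 ((M : Int) + 1) 1
        = PySem.List.pyRange 0 (M : Int) 1 ++ [(M : Int)] :=
      PySem.List.pyRange_one_succ_right (by positivity)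
    rw [hcast, hsplit]
    simp only [List.foldl_append, List.foldl_cons, List.foldl_nil]
    rw [ih (by omega)]
    have hNcast : ((N : Int) + 1) = ((N + 1 : Nat) : Int) := by push_cast; ring
    rw [hNcast]
    exact liftRow B N K _ (M : Int) (by positivity) (by omega) (N + 1) (by push_cast; omega)

theorem dp0_eq (B N K : Nat) :
    (PySem.List.pyRange 0 ((B : Int) + 1) 1).map (fun _ =>
      (PySem.List.pyRange 0 ((N : Int) + 1) 1).map (fun _ =>
        (PySem.List.pyRange 0 ((K : Int) + 1) 1).map (fun _ => (0 : Int))))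
    = mk3 B N K (fun _ _ _ => 0) := by
  unfold mk3
  simp only [List.map_const', List.length_range, PySem.List.length_pyRange_one, sub_zero]
  rw [show ((B : Int) + 1).toNat = B + 1 from by omega,
      show ((N : Int) + 1).toNat = N + 1 from by omega,
      show ((K : Int) + 1).toNat = K + 1 from by omega]

-- A's result
theorem portA_eq (b n k : Int) (hb : 0 ≤ b) (hn : 0 ≤ n) (hk : 0 ≤ k) :
    distribute_robots b n k = fDP k.toNat n.toNat b.toNat := by
  obtain ⟨B, rfl⟩ : ∃ B : Nat, b = (B : Int) := ⟨b.toNat, by omega⟩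
  obtain ⟨N, rfl⟩ : ∃ N : Nat, n = (N : Int) := ⟨n.toNat, by omega⟩
  obtain ⟨K, rfl⟩ : ∃ K : Nat, k = (K : Int) := ⟨k.toNat, by omega⟩
  simp only [distribute_robots]
  rw [dp0_eq B N K]
  have hBcast : ((B : Int) + 1) = ((B + 1 : Nat) : Int) := by push_cast; ring
  rw [hBcast, liftOuter B N K (B + 1) (by push_cast; omega),
      mk3_get B N K _ (B : Int) (N : Int) (K : Int) (by positivity) le_rfl (by positivity)
        le_rfl (by positivity) le_rfl]
  have h := outerLoop K N (B + 1) (B : Int) (N : Int) (K : Int)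
    (by positivity) (by positivity) le_rfl (by positivity) le_rfl (by push_cast; omega)
  simpa using h

-- ---- B side ----

-- one pass of the inner loop extends the column for j+1 by the sliding recurrence
theorem innerB (K B : Nat) (j : Nat) (cur : List Int)
    (hcur : cur = (List.range (B + 1)).map (fun i => fDP K j i)) (M : Nat) (hM : M ≤ B) :
    (PySem.List.pyRange 1 ((M : Int) + 1) 1).foldl
      (fun new i => new ++ [PySem.List.pyGetD new (i - 1) 0 + PySem.List.pyGetD cur i 0
          - (if (K : Int) + 1 ≤ i then PySem.List.pyGetD cur (i - (K : Int) - 1) 0 else 0)]) [1]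
    = (List.range (M + 1)).map (fun i => fDP K (j + 1) i) := by
  induction M with
  | zero => simp [PySem.List.pyRange_one_eq_nil, fDP_zero]
  | succ M ih =>
    have hcast : ((M + 1 : Nat) : Int) = (M : Int) + 1 := by push_cast; ring
    have hsplit : PySem.List.pyRange 1 ((M : Int) + 1 + 1) 1
        = PySem.List.pyRange 1 ((M : Int) + 1) 1 ++ [(M : Int) + 1] :=
      PySem.List.pyRange_one_succ_right (by omega)
    rw [hcast, hsplit, List.foldl_append, ih (by omega)]
    simp only [List.foldl_cons, List.foldl_nil]
    have hgetnew : PySem.List.pyGetD ((List.range (M + 1)).map (fun i => fDP K (j + 1) i))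
        ((M : Int) + 1 - 1) 0 = fDP K (j + 1) M := by
      rw [show (M : Int) + 1 - 1 = ((M : Nat) : Int) from by ring,
          PySem.List.pyGetD_natCast, List.getD_eq_getElem?_getD]
      simp
    have hgetcur : PySem.List.pyGetD cur ((M : Int) + 1) 0 = fDP K j (M + 1) := by
      rw [show (M : Int) + 1 = ((M + 1 : Nat) : Int) from by push_cast; ring,
          PySem.List.pyGetD_natCast, hcur, List.getD_eq_getElem?_getD]
      have hlt : M + 1 < B + 1 := by omega
      simp [hlt]
    rw [hgetnew, hgetcur]
    conv_rhs => rw [List.range_succ, List.map_append, List.map_singleton]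
    congr 2
    rw [fDP_slide]
    congr 1
    by_cases hKM : K ≤ M
    · rw [if_pos (show (K : Int) + 1 ≤ (M : Int) + 1 by omega), if_pos hKM]
      rw [show (M : Int) + 1 - (K : Int) - 1 = ((M - K : Nat) : Int) from by
            push_cast [hKM]; ring,
          PySem.List.pyGetD_natCast, hcur, List.getD_eq_getElem?_getD]
      have hlt : M - K < B + 1 := by omega
      simp [hlt]
    · rw [if_neg (show ¬((K : Int) + 1 ≤ (M : Int) + 1) by omega), if_neg hKM]

-- the outer j-loop of B
theorem outerB (K B : Nat) (N : Nat) :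
    (PySem.List.pyRange 0 (N : Int) 1).foldl (fun cur _ =>
      (PySem.List.pyRange 1 ((B : Int) + 1) 1).foldl
        (fun new i => new ++ [PySem.List.pyGetD new (i - 1) 0 + PySem.List.pyGetD cur i 0
            - (if (K : Int) + 1 ≤ i then PySem.List.pyGetD cur (i - (K : Int) - 1) 0 else 0)]) [1])
      (1 :: List.replicate B 0)
    = (List.range (B + 1)).map (fun i => fDP K N i) := by
  induction N with
  | zero =>
    simp only [Nat.cast_zero, PySem.List.pyRange_one_eq_nil le_rfl, List.foldl_nil]
    rw [List.range_succ_eq_map]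
    simp only [List.map_cons, List.map_map]
    rw [fDP_zero]
    congr 1
    symm
    rw [List.eq_replicate_iff]
    refine ⟨by simp, ?_⟩
    intro x hx
    simp only [List.mem_map, List.mem_range] at hx
    obtain ⟨a, _, rfl⟩ := hx
    simp [fDP]
  | succ N ih =>
    have hcast : ((N + 1 : Nat) : Int) = (N : Int) + 1 := by push_cast; ring
    have hsplit : PySem.List.pyRange 0 ((N : Int) + 1) 1
        = PySem.List.pyRange 0 (N : Int) 1 ++ [(N : Int)] :=
      PySem.List.pyRange_one_succ_right (by positivity)
    rw [hcast, hsplit, List.foldl_append]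
    simp only [List.foldl_cons, List.foldl_nil]
    exact innerB K B N _ ih B le_rfl

theorem portB_eq (b n k : Int) (hb : 0 ≤ b) (hn : 0 ≤ n) (hk : 0 ≤ k) :
    distribute_robots_alt b n k = fDP k.toNat n.toNat b.toNat := by
  obtain ⟨B, rfl⟩ : ∃ B : Nat, b = (B : Int) := ⟨b.toNat, by omega⟩
  obtain ⟨N, rfl⟩ : ∃ N : Nat, n = (N : Int) := ⟨n.toNat, by omega⟩
  obtain ⟨K, rfl⟩ : ∃ K : Nat, k = (K : Int) := ⟨k.toNat, by omega⟩
  unfold distribute_robots_alt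
  simp only [Int.toNat_natCast]
  rw [outerB K B N, PySem.List.pyGetD_natCast, List.getD_eq_getElem?_getD]
  simp

-- ===== VERDICT (by name: the statement is the Claim_ definition above) =====
theorem distribute_robots_spec : Claim_equal_distribute_robots := by
  intro b n k _ hpre
  obtain ⟨hb, hn, hk⟩ := hpre
  unfold Spec_distribute_robots
  rw [portA_eq b n k hb hn hk, portB_eq b n k hb hn hk]
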